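-- pv_equiv track=rewrite | github.com/rathagrimes/ls_py110 | lesson_1/sum_triangle_row.py | build_triangle_rows
-- ===== SOURCE A (Python) =====
-- def build_triangle_rows(n):
--     rows = []
--     last_val = 0
--     for i in range(1, n+1):
--         new_row = []
--         for j in range(0, i):
--             last_val += 2
--             new_row.append(last_val)
--         rows.append(new_row)
--     return rows
-- ===== SOURCE B (Python) =====
-- def build_triangle_rows(n):
--     total = n * (n + 1) // 2 if n > 0 else 0
--     evens = [2 * k for k in range(1, total + 1)]
--     rows = []
--     offset = 0
--     for i in range(1, n + 1):
--         rows.append(evens[offset:offset + i])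
--         offset += i
--     return rows
-- ===== Notes on version B (the rewrite author's own statement) =====
-- stated objective: alternative
-- what changed: Replaces the nested accumulator loops (running last_val mutated inside an inner loop) by computing the triangular total in closed form, generating the flat list of the first `total` even numbers in one pass, and partitioning it into rows by slicing with a running offset.
import Mathlib
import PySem

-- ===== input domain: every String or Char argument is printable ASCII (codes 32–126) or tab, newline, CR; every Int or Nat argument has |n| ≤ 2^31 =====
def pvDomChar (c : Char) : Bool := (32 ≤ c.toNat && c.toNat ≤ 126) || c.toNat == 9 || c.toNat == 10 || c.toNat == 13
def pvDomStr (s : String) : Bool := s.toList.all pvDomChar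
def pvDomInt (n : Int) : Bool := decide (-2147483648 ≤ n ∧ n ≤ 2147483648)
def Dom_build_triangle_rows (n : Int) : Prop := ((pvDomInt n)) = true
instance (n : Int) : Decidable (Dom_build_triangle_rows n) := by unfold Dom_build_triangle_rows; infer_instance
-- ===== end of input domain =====

-- B replaces A's nested accumulator loops by closed-form total + one flat even-number list + slicing (objective: alternative).

-- ===== PORT A =====
def build_triangle_rows (n : Int) : List (List Int) :=
  ((PySem.List.pyRange 1 (n+1) 1).foldl
    (fun (acc : List (List Int) × Int) (i : Int) =>
      let inner := (PySem.List.pyRange 0 i 1).foldl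
        (fun (st : List Int × Int) (_ : Int) => (st.1 ++ [st.2 + 2], st.2 + 2)) ([], acc.2)
      (acc.1 ++ [inner.1], inner.2))
    ([], 0)).1

-- ===== PORT B =====
def build_triangle_rows_alt (n : Int) : List (List Int) :=
  let total : Int := if 0 < n then PySem.Int.floordiv (n * (n+1)) 2 else 0
  let evens : List Int := (PySem.List.pyRange 1 (total+1) 1).map (fun k => 2*k)
  ((PySem.List.pyRange 1 (n+1) 1).foldl
    (fun (acc : List (List Int) × Int) (i : Int) =>
      (acc.1 ++ [PySem.List.slice evens (some acc.2) (some (acc.2 + i))], acc.2 + i))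
    ([], 0)).1

-- ===== PRECONDITION & SPEC =====
def Spec_build_triangle_rows (n : Int) (out : List (List Int)) : Prop := out = build_triangle_rows_alt n
instance (n : Int) (out : List (List Int)) : Decidable (Spec_build_triangle_rows n out) := by unfold Spec_build_triangle_rows; infer_instance

-- ===== CLAIM (what is proved, stated in full; the proofs are below) =====
def Claim_equal_build_triangle_rows : Prop := ∀ (n : Int), Dom_build_triangle_rows n → Spec_build_triangle_rows n (build_triangle_rows n)

-- ===== LEMMAS AND PROOFS =====

/-- Triangular numbers. -/
def triT : Nat → Nat
  | 0 => 0
  | m+1 => triT m + (m+1)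

/-- The (m+1)-st row, 0-indexed by m. -/
def canonRow (m : Nat) : List Int :=
  (List.range (m+1)).map (fun j : Nat => (m:Int) * ((m:Int)+1) + 2*((j:Int)+1))

def canon : Nat → List (List Int)
  | 0 => []
  | m+1 => canon m ++ [canonRow m]

lemma two_triT (N : Nat) : 2 * triT N = N * (N+1) := by
  induction N with
  | zero => rfl
  | succ m ih => simp only [triT, Nat.mul_add, ih]; ring

lemma triT_mono {a b : Nat} (h : a ≤ b) : triT a ≤ triT b := by
  induction b with
  | zero => have : a = 0 := Nat.le_zero.mp h; simp [this]
  | succ m ih =>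
    rcases Nat.lt_or_ge a (m+1) with h' | h'
    · exact le_trans (ih (Nat.lt_succ_iff.mp h')) (by simp [triT])
    · have : a = m + 1 := le_antisymm h h'
      simp [this]

lemma innerA (k : Nat) (r : List Int) (v : Int) :
    (PySem.List.pyRange 0 (k:Int) 1).foldl
      (fun (st : List Int × Int) (_ : Int) => (st.1 ++ [st.2 + 2], st.2 + 2)) (r, v)
    = (r ++ (List.range k).map (fun j : Nat => v + 2*((j:Int)+1)), v + 2*(k:Int)) := by
  induction k generalizing r v with
  | zero => simp [PySem.List.pyRange_one_eq_nil]
  | succ m ih =>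
    have hsplit : PySem.List.pyRange 0 ((m:Int)+1) 1
        = PySem.List.pyRange 0 (m:Int) 1 ++ [(m:Int)] :=
      PySem.List.pyRange_one_succ_right (by positivity)
    push_cast
    rw [hsplit, List.foldl_append, ih]
    simp [List.range_succ]
    ring

lemma outerA (m : Nat) :
    (PySem.List.pyRange 1 ((m:Int)+1) 1).foldl
      (fun (acc : List (List Int) × Int) (i : Int) =>
        let inner := (PySem.List.pyRange 0 i 1).foldl
          (fun (st : List Int × Int) (_ : Int) => (st.1 ++ [st.2 + 2], st.2 + 2)) ([], acc.2)
        (acc.1 ++ [inner.1], inner.2))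
      ([], 0)
    = (canon m, (m:Int) * ((m:Int)+1)) := by
  induction m with
  | zero => simp [PySem.List.pyRange_one_eq_nil, canon]
  | succ m ih =>
    have hsplit : PySem.List.pyRange 1 (((m+1:Nat):Int) + 1) 1
        = PySem.List.pyRange 1 ((m:Int)+1) 1 ++ [(m:Int)+1] := by
      push_cast
      exact PySem.List.pyRange_one_succ_right (by omega)
    push_cast at hsplit ⊢
    rw [hsplit, List.foldl_append, ih]
    have hin := innerA (m+1) [] ((m:Int) * ((m:Int)+1))
    push_cast at hin
    simp only [List.foldl_cons, List.foldl_nil]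
    simp only [hin]
    simp only [canon, canonRow, List.nil_append, Prod.mk.injEq]
    exact ⟨trivial, by ring⟩

lemma slice_evens (N m : Nat) (h : m < N) :
    PySem.List.slice ((List.range (triT N)).map (fun k : Nat => 2*((k:Int)+1)))
      (some ((triT m : Nat):Int)) (some (((triT m : Nat):Int) + ((m+1 : Nat):Int)))
    = canonRow m := by
  rw [PySem.List.slice_natCast_add]
  have hle : triT m + (m+1) ≤ triT N := by
    have := triT_mono (Nat.succ_le_of_lt h)
    simpa [triT] using this
  have hsplit : triT N = triT m + (triT N - triT m) := by omega
  have hlen : ((List.range (triT m)).map (fun k : Nat => 2*((k:Int)+1))).length = triT m := by simp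
  rw [hsplit, List.range_add, List.map_append, List.drop_left' hlen, List.map_map,
      ← List.map_take, List.take_range]
  have hmin : min (m+1) (triT N - triT m) = m+1 := by omega
  rw [hmin]
  unfold canonRow
  apply List.map_congr_left
  intro j _
  have h2 : ((2:Int)) * (triT m : Int) = (m:Int) * ((m:Int)+1) := by
    exact_mod_cast congrArg (Nat.cast : Nat → Int) (two_triT m)
  simp only [Function.comp_apply]
  push_cast
  linarith

lemma evens_eq (t : Nat) :
    (PySem.List.pyRange 1 ((t:Int)+1) 1).map (fun k => 2*k)
      = (List.range t).map (fun k : Nat => 2*((k:Int)+1)) := by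
  rw [PySem.List.pyRange_one]
  have : (((t:Int)+1) - 1).toNat = t := by omega
  rw [this, List.map_map]
  apply List.map_congr_left
  intro j _
  simp only [Function.comp_apply]
  ring

lemma outerB (N m : Nat) (h : m ≤ N) :
    (PySem.List.pyRange 1 ((m:Int)+1) 1).foldl
      (fun (acc : List (List Int) × Int) (i : Int) =>
        (acc.1 ++ [PySem.List.slice ((List.range (triT N)).map (fun k : Nat => 2*((k:Int)+1)))
          (some acc.2) (some (acc.2 + i))], acc.2 + i))
      ([], 0)
    = (canon m, ((triT m : Nat):Int)) := by
  induction m with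
  | zero => simp [PySem.List.pyRange_one_eq_nil, canon, triT]
  | succ m ih =>
    have hsplit : PySem.List.pyRange 1 (((m+1:Nat):Int) + 1) 1
        = PySem.List.pyRange 1 ((m:Int)+1) 1 ++ [(m:Int)+1] := by
      push_cast
      exact PySem.List.pyRange_one_succ_right (by omega)
    push_cast at hsplit ⊢
    rw [hsplit, List.foldl_append, ih (by omega)]
    have hs := slice_evens N m (by omega)
    have hcast : ((triT m : Nat):Int) + ((m:Int)+1) = ((triT m : Nat):Int) + ((m+1 : Nat):Int) := by
      push_cast; ring
    simp only [List.foldl_cons, List.foldl_nil]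
    simp only [hcast, hs]
    simp only [canon, Prod.mk.injEq]
    exact ⟨trivial, by push_cast [triT]; ring⟩

lemma total_eq (N : Nat) :
    PySem.Int.floordiv ((N:Int) * ((N:Int)+1)) 2 = ((triT N : Nat):Int) := by
  have h2 : (N:Int) * ((N:Int)+1) = ((2 * triT N : Nat):Int) := by
    rw [two_triT]; push_cast; ring
  rw [h2, show (2:Int) = ((2:Nat):Int) by norm_num, PySem.Int.floordiv_natCast]
  congr 1
  omega

-- ===== VERDICT (by name: the statement is the Claim_ definition above) =====
theorem build_triangle_rows_spec : Claim_equal_build_triangle_rows := by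
  intro n _
  unfold Spec_build_triangle_rows build_triangle_rows build_triangle_rows_alt
  by_cases h : 0 < n
  · have hN : n = ((n.toNat : Nat):Int) := (Int.toNat_of_nonneg h.le).symm
    simp only [if_pos h]
    rw [hN, total_eq, evens_eq, outerA, outerB n.toNat n.toNat le_rfl]
  · have hnil : PySem.List.pyRange 1 (n+1) 1 = [] :=
      PySem.List.pyRange_one_eq_nil (by omega)
    simp [hnil]
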